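-- pv_equiv track=rewrite | github.com/melngr/aoc17 | solutions/day17.py | gen_spinlock
-- ===== SOURCE A (Python) =====
-- def gen_spinlock(step, moment):
--     c_buffer = [0]
--     curr = 0
--     for i in range(1, (moment + 1)):
--         pos = (curr + step) % len(c_buffer)
--         c_buffer.insert( (pos + 1), i )
--         curr = pos + 1
--
--     return c_buffer
-- ===== SOURCE B (Python) =====
-- def gen_spinlock(step, moment):
--     # Offline two-phase reconstruction: no list insertions during the walk.
--     # Phase 1: the insertion index of value i depends only on the buffer
--     # LENGTH (which is i), so every index is computed arithmetically.
--     ps = []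
--     curr = 0
--     for i in range(1, moment + 1):
--         curr = (curr + step) % i + 1
--         ps.append(curr)
--     # Phase 2: fill a fixed array back to front.  Processing values in
--     # DESCENDING order, value i occupies the ps[i-1]-th still-free slot of
--     # the final array (later insertions cannot disturb that rank); 0 keeps
--     # the one remaining slot, which the initialisation already holds.
--     res = [0] * (len(ps) + 1)
--     free = list(range(len(ps) + 1))
--     i = len(ps)
--     for p in reversed(ps):
--         res[free.pop(p)] = i
--         i -= 1
--     return res
-- ===== Notes on version B (the rewrite author's own statement) =====
-- stated objective: alternative
-- what changed: B never builds the buffer by repeated insertion: phase 1 computes every insertion index purely arithmetically (the buffer length at step i is just i), and phase 2 reconstructs the final array offline by walking the recorded indices in reverse, placing each value into the k-th still-free slot of a preallocated array (reverse order-statistics fill), while A simulates the spinlock with list.insert on a growing buffer.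
import Mathlib
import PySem

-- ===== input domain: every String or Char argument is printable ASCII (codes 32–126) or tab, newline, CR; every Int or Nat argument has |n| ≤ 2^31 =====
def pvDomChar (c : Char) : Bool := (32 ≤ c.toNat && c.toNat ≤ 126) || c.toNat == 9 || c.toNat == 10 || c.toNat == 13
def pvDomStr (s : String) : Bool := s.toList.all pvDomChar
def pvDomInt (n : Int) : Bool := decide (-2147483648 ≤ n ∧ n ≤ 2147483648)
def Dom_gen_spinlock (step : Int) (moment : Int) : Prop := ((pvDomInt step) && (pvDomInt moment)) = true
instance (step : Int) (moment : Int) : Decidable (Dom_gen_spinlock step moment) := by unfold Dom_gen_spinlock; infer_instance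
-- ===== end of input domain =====

-- B replaces A's repeated list insertion by an offline two-phase reconstruction:
-- arithmetic insertion indices first, then a reverse free-slot fill of a fixed array.

-- ===== PORT A =====
-- c_buffer.insert(pos+1, i) with curr tracked; len(c_buffer) = i at iteration i.
def spinStepA (step : Int) (st : List Int × Int) (i : Int) : List Int × Int :=
  let pos := PySem.Int.mod (st.2 + step) (st.1.length : Int)
  (PySem.List.insert st.1 (pos + 1) i, pos + 1)

def gen_spinlock (step : Int) (moment : Int) : List Int :=
  ((PySem.List.pyRange 1 (moment + 1) 1).foldl (spinStepA step) ([0], 0)).1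

-- ===== PORT B =====
-- phase 1: curr = (curr + step) % i + 1; ps.append(curr)
def spinStepP (step : Int) (st : Int × List Int) (i : Int) : Int × List Int :=
  let c := PySem.Int.mod (st.1 + step) i + 1
  (c, st.2 ++ [c])

-- phase 2 body: res[free.pop(p)] = i; i -= 1   (state = (i, res, free))
def spinStepF (st : Int × List Int × List Int) (p : Int) : Int × List Int × List Int :=
  match PySem.List.pop? st.2.2 p with
  | some (slot, fr) => (st.1 - 1, st.2.1.set slot.toNat st.1, fr)
      -- slot comes from list(range(..)), hence nonneg and in range: .set slot.toNat is exact
  | none => (st.1 - 1, st.2.1, st.2.2)  -- unreachable: Python would raise IndexError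

def gen_spinlock_alt (step : Int) (moment : Int) : List Int :=
  let ps := ((PySem.List.pyRange 1 (moment + 1) 1).foldl (spinStepP step) (0, [])).2
  (ps.reverse.foldl spinStepF
    ((ps.length : Int), List.replicate (ps.length + 1) 0,
      PySem.List.pyRange 0 ((ps.length : Int) + 1) 1)).2.1

-- ===== PRECONDITION & SPEC =====
def Spec_gen_spinlock (step : Int) (moment : Int) (out : List Int) : Prop := out = gen_spinlock_alt step moment
instance (step : Int) (moment : Int) (out : List Int) : Decidable (Spec_gen_spinlock step moment out) := by unfold Spec_gen_spinlock; infer_instance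

-- ===== CLAIM (what is proved, stated in full; the proofs are below) =====
def Claim_equal_gen_spinlock : Prop := ∀ (step : Int) (moment : Int), Dom_gen_spinlock step moment → Spec_gen_spinlock step moment (gen_spinlock step moment)

-- ===== LEMMAS AND PROOFS =====

-- the buffer obtained by inserting values i, i+1, … at positions ps into b
def buildIns : List Int → Int → List Int → List Int
  | [], _, b => b
  | p :: ps, i, b => buildIns ps (i + 1) (PySem.List.insert b p i)

theorem buildIns_length (ps : List Int) (i : Int) (b : List Int) :
    (buildIns ps i b).length = b.length + ps.length := by
  induction ps generalizing i b with
  | nil => simp [buildIns]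
  | cons p ps ih => simp [buildIns, ih, PySem.List.length_insert]; omega

theorem buildIns_append (qs : List Int) (p : Int) (i : Int) (b : List Int) :
    buildIns (qs ++ [p]) i b
      = PySem.List.insert (buildIns qs i b) p (i + (qs.length : Int)) := by
  induction qs generalizing i b with
  | nil => simp [buildIns]
  | cons q qs ih =>
    simp only [List.cons_append, buildIns, ih]
    congr 1
    simp only [List.length_cons]
    push_cast
    ring

-- joint invariant of A's fold and B's phase-1 fold over range(1, n+1)
theorem phase_inv (step : Int) (n : Nat) :
    (((PySem.List.pyRange 1 ((n : Int) + 1) 1).foldl (spinStepA step) ([0], 0)).1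
        = buildIns ((PySem.List.pyRange 1 ((n : Int) + 1) 1).foldl (spinStepP step) (0, [])).2 1 [0])
    ∧ ((PySem.List.pyRange 1 ((n : Int) + 1) 1).foldl (spinStepA step) ([0], 0)).2
        = ((PySem.List.pyRange 1 ((n : Int) + 1) 1).foldl (spinStepP step) (0, [])).1
    ∧ ((PySem.List.pyRange 1 ((n : Int) + 1) 1).foldl (spinStepP step) (0, [])).2.length = n
    ∧ ∀ j, j < n →
        1 ≤ ((PySem.List.pyRange 1 ((n : Int) + 1) 1).foldl (spinStepP step) (0, [])).2.getD j 0
        ∧ ((PySem.List.pyRange 1 ((n : Int) + 1) 1).foldl (spinStepP step) (0, [])).2.getD j 0 ≤ (j : Int) + 1 := by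
  induction n with
  | zero =>
    refine ⟨?_, ?_, ?_, ?_⟩ <;> simp [buildIns]
  | succ n ih =>
    obtain ⟨h1, h2, h3, h4⟩ := ih
    have hr : PySem.List.pyRange 1 (((n : Nat) + 1 : Int) + 1) 1
        = PySem.List.pyRange 1 ((n : Int) + 1) 1 ++ [(n : Int) + 1] := by
      exact_mod_cast PySem.List.pyRange_one_succ_right (a := 1) (b := (n : Int) + 1) (by omega)
    push_cast
    rw [hr]
    simp only [List.foldl_append, List.foldl_cons, List.foldl_nil]
    set sA := (PySem.List.pyRange 1 ((n : Int) + 1) 1).foldl (spinStepA step) ([0], 0) with hsA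
    set sP := (PySem.List.pyRange 1 ((n : Int) + 1) 1).foldl (spinStepP step) (0, []) with hsP
    have hlenA : ((sA.1.length : Int)) = (n : Int) + 1 := by
      have hlb : ([0] : List Int).length = 1 := rfl
      rw [h1, buildIns_length, h3, hlb]; push_cast; omega
    have hpos : (0 : Int) < (n : Int) + 1 := by positivity
    have hmn := PySem.Int.mod_nonneg (sP.1 + step) hpos
    have hml := PySem.Int.mod_lt (sP.1 + step) hpos
    simp only [spinStepA, spinStepP, h2, hlenA]
    refine ⟨?_, by first | rfl | trivial, ?_, ?_⟩
    · rw [h1, buildIns_append, h3]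
      congr 1
      omega
    · rw [List.length_append, h3]
      rfl
    · intro j hj
      rcases Nat.lt_succ_iff_lt_or_eq.mp hj with hj' | hj'
      · have hjl : j < sP.2.length := by omega
        rw [List.getD_append _ _ _ _ hjl]
        exact h4 j hj'
      · have hjn : (j : Int) = (n : Int) := by exact_mod_cast hj'
        have hge : sP.2.length ≤ j := by omega
        rw [List.getD_append_right _ _ _ _ hge]
        have hz : j - sP.2.length = 0 := by omega
        rw [hz]
        simp only [List.getD_cons_zero]
        constructor <;> omega

-- getD after set, same / different index
theorem getD_set_self (l : List Int) (i : Nat) (v : Int) (h : i < l.length) :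
    (l.set i v).getD i 0 = v := by
  simp [List.getD_eq_getElem?_getD, h]

theorem getD_set_ne (l : List Int) (i : Nat) (v : Int) (k : Nat) (h : k ≠ i) :
    (l.set i v).getD k 0 = l.getD k 0 := by
  simp [List.getD_eq_getElem?_getD, List.getElem?_set_ne (by omega : i ≠ k)]

-- in a duplicate-free list, the element at index pt does not survive erasing index pt
theorem nodup_not_mem_eraseIdx (F : List Nat) (pt : Nat) (h : pt < F.length) (hnd : F.Nodup) :
    F[pt] ∉ F.eraseIdx pt := by
  intro hm
  rw [List.mem_iff_getElem] at hm
  obtain ⟨j, hj, hje⟩ := hm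
  rw [List.getElem_eraseIdx] at hje
  split_ifs at hje with hc
  · exact absurd (hnd.getElem_inj_iff.mp hje) (by omega)
  · exact absurd (hnd.getElem_inj_iff.mp hje) (by omega)

-- B's phase-2 fill reconstructs the inserted buffer on the free slots
theorem fill_inv (ps : List Int) (F : List Nat) (res : List Int)
    (hlen : F.length = ps.length + 1) (hnd : F.Nodup)
    (hin : ∀ s ∈ F, s < res.length)
    (hb : ∀ j, j < ps.length → 1 ≤ ps.getD j 0 ∧ ps.getD j 0 ≤ (j : Int) + 1) :
    ((ps.reverse.foldl spinStepF ((ps.length : Int), res, F.map (fun s : Nat => (s : Int)))).2.1.length = res.length)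
    ∧ (∀ k, k ∉ F →
        (ps.reverse.foldl spinStepF ((ps.length : Int), res, F.map (fun s : Nat => (s : Int)))).2.1.getD k 0
          = res.getD k 0)
    ∧ F.map (fun s => (ps.reverse.foldl spinStepF ((ps.length : Int), res, F.map (fun s : Nat => (s : Int)))).2.1.getD s 0)
        = buildIns ps 1 [res.getD (F.headD 0) 0] := by
  induction ps using List.reverseRecOn generalizing F res with
  | nil =>
    obtain ⟨s0, hF⟩ := List.length_eq_one_iff.mp (by simpa using hlen)
    subst hF
    exact ⟨rfl, fun k _ => rfl, by simp [buildIns]⟩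
  | append_singleton qs p ih =>
    have hplen : (qs ++ [p]).length = qs.length + 1 := by simp
    have hpd : (qs ++ [p]).getD qs.length 0 = p := by
      rw [List.getD_append_right _ _ _ _ (le_refl _)]
      simp
    have hp := hb qs.length (by simp)
    rw [hpd] at hp
    have hFlen : F.length = qs.length + 2 := by omega
    have hpt : ((p.toNat : Nat) : Int) = p := by omega
    have hptF : p.toNat < F.length := by omega
    have hpt1 : 1 ≤ p.toNat := by omega
    have hptq : p.toNat ≤ qs.length + 1 := by omega
    have hpop : PySem.List.pop? (F.map (fun s : Nat => (s : Int))) p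
        = some ((F[p.toNat] : Int), (F.eraseIdx p.toNat).map (fun s : Nat => (s : Int))) := by
      have h := PySem.List.pop?_natCast (F.map (fun s : Nat => (s : Int))) p.toNat
        (by simpa using hptF)
      rw [hpt] at h
      rw [h, List.getElem_map, List.eraseIdx_map]
    have hstep : spinStepF ((((qs ++ [p]).length : Nat) : Int), res, F.map (fun s : Nat => (s : Int))) p
        = ((qs.length : Int), res.set F[p.toNat] ((qs.length : Int) + 1),
            (F.eraseIdx p.toNat).map (fun s : Nat => (s : Int))) := by
      simp only [spinStepF, hpop, hplen]
      push_cast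
      norm_num
    have hfold : (qs ++ [p]).reverse.foldl spinStepF
          ((((qs ++ [p]).length : Nat) : Int), res, F.map (fun s : Nat => (s : Int)))
        = qs.reverse.foldl spinStepF ((qs.length : Int),
            res.set F[p.toNat] ((qs.length : Int) + 1),
            (F.eraseIdx p.toNat).map (fun s : Nat => (s : Int))) := by
      rw [List.reverse_append, List.reverse_singleton, List.singleton_append,
        List.foldl_cons, hstep]
    set res1 := res.set F[p.toNat] ((qs.length : Int) + 1) with hres1
    set F1 := F.eraseIdx p.toNat with hF1
    have hlen1 : F1.length = qs.length + 1 := by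
      rw [hF1, List.length_eraseIdx_of_lt hptF]; omega
    have hnd1 : F1.Nodup := List.Sublist.nodup (List.eraseIdx_sublist F p.toNat) hnd
    have hin1 : ∀ s ∈ F1, s < res1.length := fun s hs => by
      rw [hres1, List.length_set]; exact hin s (List.mem_of_mem_eraseIdx hs)
    have hb1 : ∀ j, j < qs.length → 1 ≤ qs.getD j 0 ∧ qs.getD j 0 ≤ (j : Int) + 1 := by
      intro j hj
      have h := hb j (by omega)
      rwa [List.getD_append _ _ _ _ hj] at h
    obtain ⟨ihl, ihk, ihm⟩ := ih F1 res1 hlen1 hnd1 hin1 hb1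
    have hFm : F[p.toNat] ∉ F1 := nodup_not_mem_eraseIdx F p.toNat hptF hnd
    have hFptres : F[p.toNat] < res.length := hin _ (F.getElem_mem hptF)
    rw [hfold]
    refine ⟨by rw [ihl, hres1, List.length_set], ?_, ?_⟩
    · intro k hk
      have hk1 : k ∉ F1 := fun h => hk (List.mem_of_mem_eraseIdx h)
      have hkne : k ≠ F[p.toNat] := fun h => hk (h ▸ F.getElem_mem hptF)
      rw [ihk k hk1, hres1, getD_set_ne _ _ _ _ hkne]
    · obtain ⟨f0, Ftl, hFc⟩ : ∃ f0 Ftl, F = f0 :: Ftl := by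
        cases F with
        | nil => simp at hFlen
        | cons a t => exact ⟨a, t, rfl⟩
      have hhead : F1.headD 0 = F.headD 0 := by
        obtain ⟨k, hk⟩ : ∃ k, p.toNat = k + 1 := ⟨p.toNat - 1, by omega⟩
        rw [hF1, hFc, hk, List.eraseIdx_cons_succ]
        rfl
      have h0pt : F.headD 0 ≠ F[p.toNat] := by
        have : F.headD 0 = F[0]'(by omega) := by
          cases F with
          | nil => simp at hFlen
          | cons a t => rfl
        rw [this]
        intro h
        have := hnd.getElem_inj_iff.mp h
        omega
      have hv : res1.getD (F1.headD 0) 0 = res.getD (F.headD 0) 0 := by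
        rw [hhead, hres1, getD_set_ne _ _ _ _ h0pt]
      rw [hv] at ihm
      have hgpt : (qs.reverse.foldl spinStepF ((qs.length : Int), res1,
            F1.map (fun s : Nat => (s : Int)))).2.1.getD F[p.toNat] 0 = (qs.length : Int) + 1 := by
        rw [ihk _ hFm, hres1, getD_set_self _ _ _ hFptres]
      have hdecomp : F = F.take p.toNat ++ F[p.toNat] :: F.drop (p.toNat + 1) := by
        conv_lhs => rw [← List.take_append_drop p.toNat F]
        rw [List.getElem_cons_drop]
      have hF1d : F1 = F.take p.toNat ++ F.drop (p.toNat + 1) :=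
        List.eraseIdx_eq_take_drop_succ F p.toNat
      have htklen : ((F.take p.toNat).map (fun s : Nat =>
          (qs.reverse.foldl spinStepF ((qs.length : Int), res1,
            F1.map (fun s : Nat => (s : Int)))).2.1.getD s 0)).length = p.toNat := by
        rw [List.length_map, List.length_take]; omega
      have hmapF1 : F1.map (fun s : Nat =>
            (qs.reverse.foldl spinStepF ((qs.length : Int), res1,
              F1.map (fun s : Nat => (s : Int)))).2.1.getD s 0)
          = (F.take p.toNat).map (fun s : Nat =>
              (qs.reverse.foldl spinStepF ((qs.length : Int), res1,
                F1.map (fun s : Nat => (s : Int)))).2.1.getD s 0)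
            ++ (F.drop (p.toNat + 1)).map (fun s : Nat =>
              (qs.reverse.foldl spinStepF ((qs.length : Int), res1,
                F1.map (fun s : Nat => (s : Int)))).2.1.getD s 0) := by
        have h := congrArg (List.map (fun s : Nat =>
            (qs.reverse.foldl spinStepF ((qs.length : Int), res1,
              F1.map (fun s : Nat => (s : Int)))).2.1.getD s 0)) hF1d
        rwa [List.map_append] at h
      have hle : p.toNat ≤ ((F.take p.toNat).map (fun s : Nat =>
            (qs.reverse.foldl spinStepF ((qs.length : Int), res1,
              F1.map (fun s : Nat => (s : Int)))).2.1.getD s 0)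
          ++ (F.drop (p.toNat + 1)).map (fun s : Nat =>
            (qs.reverse.foldl spinStepF ((qs.length : Int), res1,
              F1.map (fun s : Nat => (s : Int)))).2.1.getD s 0)).length := by
        rw [List.length_append, htklen]; omega
      have hins : PySem.List.insert
            ((F.take p.toNat).map (fun s : Nat =>
              (qs.reverse.foldl spinStepF ((qs.length : Int), res1,
                F1.map (fun s : Nat => (s : Int)))).2.1.getD s 0)
            ++ (F.drop (p.toNat + 1)).map (fun s : Nat =>
              (qs.reverse.foldl spinStepF ((qs.length : Int), res1,
                F1.map (fun s : Nat => (s : Int)))).2.1.getD s 0))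
            p (1 + (qs.length : Int))
          = (F.take p.toNat).map (fun s : Nat =>
              (qs.reverse.foldl spinStepF ((qs.length : Int), res1,
                F1.map (fun s : Nat => (s : Int)))).2.1.getD s 0)
            ++ (1 + (qs.length : Int)) :: (F.drop (p.toNat + 1)).map (fun s : Nat =>
              (qs.reverse.foldl spinStepF ((qs.length : Int), res1,
                F1.map (fun s : Nat => (s : Int)))).2.1.getD s 0) := by
        have h2 := PySem.List.insert_natCast _ p.toNat (1 + (qs.length : Int)) hle
        rw [hpt] at h2
        rw [h2, List.take_left' htklen, List.drop_left' htklen]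
      conv_lhs => rw [hdecomp]
      rw [List.map_append, List.map_cons, buildIns_append, ← ihm, hmapF1, hins]
      congr 1
      congr 1
      rw [show (1 + (qs.length : Int)) = (qs.length : Int) + 1 from by ring]
      exact hgpt


-- ===== VERDICT (by name: the statement is the Claim_ definition above) =====
theorem gen_spinlock_spec : Claim_equal_gen_spinlock := by
  intro step moment _
  unfold Spec_gen_spinlock
  simp only [gen_spinlock, gen_spinlock_alt]
  have hR : PySem.List.pyRange 1 (moment + 1) 1
      = PySem.List.pyRange 1 ((moment.toNat : Int) + 1) 1 := by
    have h : (moment + 1 - 1).toNat = ((moment.toNat : Int) + 1 - 1).toNat := by omega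
    rw [PySem.List.pyRange_one, PySem.List.pyRange_one, h]
  rw [hR]
  obtain ⟨h1, h2, h3, h4⟩ := phase_inv step moment.toNat
  set sP := (PySem.List.pyRange 1 ((moment.toNat : Int) + 1) 1).foldl (spinStepP step) (0, []) with hsP
  have hF : PySem.List.pyRange 0 ((sP.2.length : Int) + 1) 1
      = (List.range (sP.2.length + 1)).map (fun s : Nat => (s : Int)) := by
    rw [show ((sP.2.length : Int) + 1) = ((sP.2.length + 1 : Nat) : Int) from by push_cast; ring,
      PySem.List.pyRange_zero_natCast]
  rw [hF]
  obtain ⟨fl, fk, fm⟩ := fill_inv sP.2 (List.range (sP.2.length + 1))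
    (List.replicate (sP.2.length + 1) 0)
    (by simp) List.nodup_range
    (fun s hs => by rw [List.length_replicate]; exact List.mem_range.mp hs)
    (fun j hj => h4 j (by omega))
  have hhead : (List.range (sP.2.length + 1)).headD 0 = 0 := by
    rw [List.range_succ_eq_map]
    rfl
  have hv0 : (List.replicate (sP.2.length + 1) (0 : Int)).getD 0 0 = (0 : Int) := by
    simp
  rw [hhead, hv0] at fm
  rw [h1, ← fm]
  apply List.ext_getElem
  · rw [List.length_map, List.length_range, fl, List.length_replicate]
  · intro i hi1 hi2
    have hi : i < sP.2.length + 1 := by simpa using hi1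
    rw [List.getElem_map, List.getElem_range,
      List.getD_eq_getElem _ _ (by rw [fl, List.length_replicate]; omega)]
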